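-- pv_equiv track=rewrite | github.com/wenke727/learningNote | algorithm/jiuzhang_beginning/chapter_03_two_pointer.py | twoSum7
-- ===== SOURCE A (Python) =====
-- def twoSum7(nums, target):
--     if not nums:
--         return [-1, -1]
--
--     nums.sort()
--     target = abs(target)
--     j = 1
--     for i in range(len(nums)):
--         j = max(j, i+1)
--         while j < len(nums) and nums[j] - nums[i] < target:
--             j += 1
--
--         if j >= len(nums):
--             break
--         if nums[j] - nums[i] == target:
--             return [nums[i], nums[j]]
--
--     return [-1, -1]
-- ===== SOURCE B (Python) =====
-- def twoSum7(nums, target):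
--     if not nums:
--         return [-1, -1]
--     nums.sort()
--     t = abs(target)
--     if t == 0:
--         # a pair with difference 0 is an adjacent duplicate in the sorted list
--         for a, b in zip(nums, nums[1:]):
--             if a == b:
--                 return [a, a]
--         return [-1, -1]
--     seen = set(nums)
--     for x in nums:
--         if x + t in seen:
--             return [x, x + t]
--     return [-1, -1]
-- ===== Notes on version B (the rewrite author's own statement) =====
-- stated objective: alternative
-- what changed: After the same in-place sort, the monotone two-pointer sweep is replaced by a single hash-set membership pass (x+|target| in set(nums)), with a separate adjacent-duplicate scan for target 0.
import Mathlib
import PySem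

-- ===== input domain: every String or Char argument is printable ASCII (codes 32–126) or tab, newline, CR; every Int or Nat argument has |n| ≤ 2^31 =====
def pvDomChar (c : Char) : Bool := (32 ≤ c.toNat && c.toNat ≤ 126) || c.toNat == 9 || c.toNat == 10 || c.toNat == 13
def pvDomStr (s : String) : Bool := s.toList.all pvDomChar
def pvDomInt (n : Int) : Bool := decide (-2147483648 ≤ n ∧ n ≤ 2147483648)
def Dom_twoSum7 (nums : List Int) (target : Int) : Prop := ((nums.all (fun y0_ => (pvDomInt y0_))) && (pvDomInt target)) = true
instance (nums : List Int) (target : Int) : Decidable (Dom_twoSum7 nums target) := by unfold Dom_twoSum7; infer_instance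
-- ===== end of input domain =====

-- B replaces A's monotone two-pointer sweep by a hash-set lookup pass (plus an adjacent-duplicate
-- scan for target 0); same return value everywhere (objective: alternative, not faster).
-- Both A and B sort `nums` in place (same observable mutation); the equivalence proved here is
-- about the return value.

-- ===== PORT A =====
-- the inner `while j < len(nums) and nums[j] - nums[i] < target: j += 1`
-- (indices are guarded by `j < len(nums)` before every access, so `getD _ 0` is exact)
def twoSum7While (l : List Int) (t : Int) (i : Nat) (j : Nat) : Nat :=
  if h : j < l.length ∧ l.getD j 0 - l.getD i 0 < t then twoSum7While l t i (j + 1) else j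
  termination_by l.length - j
  decreasing_by omega

-- the outer `for i in range(len(nums))` with carried state j, break and early returns
def twoSum7Loop (l : List Int) (t : Int) (i : Nat) (j : Nat) : List Int :=
  if hi : i < l.length then
    let j' := twoSum7While l t i (max j (i + 1))
    if l.length ≤ j' then [-1, -1]
    else if l.getD j' 0 - l.getD i 0 = t then [l.getD i 0, l.getD j' 0]
    else twoSum7Loop l t (i + 1) j'
  else [-1, -1]
  termination_by l.length - i

def twoSum7 (nums : List Int) (target : Int) : List Int :=
  if nums = [] then [-1, -1]
  else
    let l := PySem.List.sorted nums (fun x => x)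
    twoSum7Loop l |target| 0 1

-- ===== PORT B =====
-- `for a, b in zip(nums, nums[1:]): if a == b: return [a, a]`
def twoSum7DupScan : List Int → List Int
  | a :: b :: rest => if a = b then [a, a] else twoSum7DupScan (b :: rest)
  | _ => [-1, -1]

-- `for x in nums: if x + t in seen: return [x, x + t]`
def twoSum7SetScan (xs : List Int) (t : Int) (seen : PySem.Set Int) : List Int :=
  match xs with
  | [] => [-1, -1]
  | x :: rest => if (x + t) ∈ seen then [x, x + t] else twoSum7SetScan rest t seen

def twoSum7_alt (nums : List Int) (target : Int) : List Int :=
  if nums = [] then [-1, -1]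
  else
    let l := PySem.List.sorted nums (fun x => x)
    let t := |target|
    if t = 0 then twoSum7DupScan l
    else twoSum7SetScan l t (PySem.Set.ofList l)

-- ===== PRECONDITION & SPEC =====
def Spec_twoSum7 (nums : List Int) (target : Int) (out : List Int) : Prop := out = twoSum7_alt nums target
instance (nums : List Int) (target : Int) (out : List Int) : Decidable (Spec_twoSum7 nums target out) := by unfold Spec_twoSum7; infer_instance

-- ===== CLAIM (what is proved, stated in full; the proofs are below) =====
def Claim_equal_twoSum7 : Prop := ∀ (nums : List Int) (target : Int), Dom_twoSum7 nums target → Spec_twoSum7 nums target (twoSum7 nums target)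

-- ===== LEMMAS AND PROOFS =====

-- ghost reference: first element x (in order) such that x + t occurs strictly later
def twoSum7Ghost (xs : List Int) (t : Int) : List Int :=
  match xs with
  | [] => [-1, -1]
  | x :: rest => if x + t ∈ rest then [x, x + t] else twoSum7Ghost rest t

lemma getD_mono (l : List Int) (hs : l.Pairwise (· ≤ ·)) {a b : Nat}
    (hab : a ≤ b) (hb : b < l.length) : l.getD a 0 ≤ l.getD b 0 := by
  have ha : a < l.length := lt_of_le_of_lt hab hb
  rw [List.getD_eq_getElem l 0 ha, List.getD_eq_getElem l 0 hb]
  rcases Nat.lt_or_ge a b with h | h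
  · exact List.pairwise_iff_getElem.mp hs a b ha hb h
  · have : a = b := le_antisymm hab h
    subst this; exact le_refl _

lemma mem_drop_iff_idx (l : List Int) (m : Nat) (x : Int) :
    x ∈ l.drop m ↔ ∃ k, m ≤ k ∧ ∃ h : k < l.length, l[k] = x := by
  constructor
  · intro hx
    rcases List.mem_iff_getElem.mp hx with ⟨n, hn, he⟩
    have hlen : (l.drop m).length = l.length - m := List.length_drop
    refine ⟨m + n, Nat.le_add_right _ _, by omega, ?_⟩
    rw [← List.getElem_drop (h := hn)]; exact he
  · rintro ⟨k, hmk, hk, rfl⟩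
    apply List.mem_iff_getElem.mpr
    have hlen : (l.drop m).length = l.length - m := List.length_drop
    refine ⟨k - m, by omega, ?_⟩
    rw [List.getElem_drop]
    congr 1; omega

lemma while_spec_aux (l : List Int) (t : Int) (i : Nat) :
    ∀ n j, l.length - j = n → j ≤ l.length →
      j ≤ twoSum7While l t i j ∧ twoSum7While l t i j ≤ l.length ∧
      (∀ k, j ≤ k → k < twoSum7While l t i j → l.getD k 0 - l.getD i 0 < t) ∧
      (twoSum7While l t i j < l.length → t ≤ l.getD (twoSum7While l t i j) 0 - l.getD i 0) := by
  intro n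
  induction n with
  | zero =>
    intro j hn hj
    have hj' : j = l.length := by omega
    rw [twoSum7While]
    have hc : ¬ (j < l.length ∧ l.getD j 0 - l.getD i 0 < t) := by
      intro h; omega
    rw [dif_neg hc]
    refine ⟨le_refl _, by omega, by omega, by omega⟩
  | succ n ih =>
    intro j hn hj
    rw [twoSum7While]
    by_cases hc : j < l.length ∧ l.getD j 0 - l.getD i 0 < t
    · rw [dif_pos hc]
      obtain ⟨h1, h2, h3, h4⟩ := ih (j + 1) (by omega) (by omega)
      refine ⟨by omega, h2, ?_, h4⟩
      intro k hk1 hk2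
      rcases Nat.lt_or_ge k (j + 1) with h | h
      · have : k = j := by omega
        subst this; exact hc.2
      · exact h3 k h hk2
    · rw [dif_neg hc]
      refine ⟨le_refl _, hj, by omega, ?_⟩
      intro hlt
      by_contra hnot
      exact hc ⟨hlt, by omega⟩

lemma while_spec (l : List Int) (t : Int) (i : Nat) :
    ∀ j, j ≤ l.length →
      j ≤ twoSum7While l t i j ∧ twoSum7While l t i j ≤ l.length ∧
      (∀ k, j ≤ k → k < twoSum7While l t i j → l.getD k 0 - l.getD i 0 < t) ∧
      (twoSum7While l t i j < l.length → t ≤ l.getD (twoSum7While l t i j) 0 - l.getD i 0) :=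
  fun j hj => while_spec_aux l t i (l.length - j) j rfl hj

lemma ghost_none_aux (l : List Int) (hs : l.Pairwise (· ≤ ·)) (t : Int) :
    ∀ n i, l.length - i = n → (∀ k, i < k → k < l.length → l.getD k 0 < l.getD i 0 + t) →
      twoSum7Ghost (l.drop i) t = [-1, -1] := by
  intro n
  induction n with
  | zero =>
    intro i hn _
    rw [List.drop_eq_nil_of_le (by omega)]
    rfl
  | succ n ih =>
    intro i hn H
    have hi : i < l.length := by omega
    rw [List.drop_eq_getElem_cons hi, twoSum7Ghost]
    have hmem : l[i] + t ∉ l.drop (i + 1) := by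
      intro hmem
      rcases (mem_drop_iff_idx l (i + 1) (l[i] + t)).mp hmem with ⟨k, hk1, hk2, hk3⟩
      have := H k (by omega) hk2
      rw [List.getD_eq_getElem l 0 hk2, List.getD_eq_getElem l 0 hi] at this
      omega
    rw [if_neg hmem]
    by_cases hi1 : i + 1 < l.length
    · apply ih (i + 1) (by omega)
      intro k hk1 hk2
      have h1 := H k (by omega) hk2
      have h2 : l.getD i 0 ≤ l.getD (i + 1) 0 := getD_mono l hs (by omega) hi1
      omega
    · rw [List.drop_eq_nil_of_le (by omega)]
      rfl

lemma ghost_none (l : List Int) (hs : l.Pairwise (· ≤ ·)) (t : Int) :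
    ∀ i, (∀ k, i < k → k < l.length → l.getD k 0 < l.getD i 0 + t) →
      twoSum7Ghost (l.drop i) t = [-1, -1] :=
  fun i H => ghost_none_aux l hs t (l.length - i) i rfl H

lemma loop_eq_ghost_aux (l : List Int) (hs : l.Pairwise (· ≤ ·)) (t : Int) :
    ∀ n i j, l.length - i = n → j ≤ l.length →
      (∀ k, i < k → k < j → l.getD k 0 < l.getD i 0 + t) →
      twoSum7Loop l t i j = twoSum7Ghost (l.drop i) t := by
  intro n
  induction n with
  | zero =>
    intro i j hn hj H
    have hi : ¬ i < l.length := by omega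
    rw [twoSum7Loop, dif_neg hi, List.drop_eq_nil_of_le (by omega)]
    rfl
  | succ n ih =>
    intro i j hn hj H
    have hi : i < l.length := by omega
    rw [twoSum7Loop, dif_pos hi]
    have hm : max j (i + 1) ≤ l.length := by omega
    obtain ⟨w1, w2, w3, w4⟩ := while_spec l t i (max j (i + 1)) hm
    set j' := twoSum7While l t i (max j (i + 1)) with hj'
    -- combined invariant at i up to j'
    have Hc : ∀ k, i < k → k < j' → l.getD k 0 < l.getD i 0 + t := by
      intro k hk1 hk2
      rcases Nat.lt_or_ge k (max j (i + 1)) with h | h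
      · have hkj : k < j := by omega
        exact H k hk1 hkj
      · have := w3 k h hk2
        omega
    by_cases hbr : l.length ≤ j'
    · rw [if_pos hbr]
      have hj'len : j' = l.length := by omega
      rw [ghost_none l hs t i (fun k hk1 hk2 => Hc k hk1 (by omega))]
    · rw [if_neg hbr]
      have hj'lt : j' < l.length := by omega
      have hstop := w4 hj'lt
      have hij' : i + 1 ≤ j' := by omega
      rw [List.drop_eq_getElem_cons hi, twoSum7Ghost]
      by_cases heq : l.getD j' 0 - l.getD i 0 = t
      · rw [if_pos heq]
        have hmem : l[i] + t ∈ l.drop (i + 1) := by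
          apply (mem_drop_iff_idx l (i + 1) (l[i] + t)).mpr
          refine ⟨j', hij', hj'lt, ?_⟩
          rw [List.getD_eq_getElem l 0 hj'lt, List.getD_eq_getElem l 0 hi] at heq
          omega
        rw [if_pos hmem]
        rw [List.getD_eq_getElem l 0 hj'lt, List.getD_eq_getElem l 0 hi] at heq ⊢
        have : l[j'] = l[i] + t := by omega
        rw [this]
      · rw [if_neg heq]
        have hgt : l.getD i 0 + t < l.getD j' 0 := by omega
        have hmem : l[i] + t ∉ l.drop (i + 1) := by
          intro hmem
          rcases (mem_drop_iff_idx l (i + 1) (l[i] + t)).mp hmem with ⟨k, hk1, hk2, hk3⟩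
          rcases Nat.lt_or_ge k j' with h | h
          · have := Hc k (by omega) h
            rw [List.getD_eq_getElem l 0 hk2, List.getD_eq_getElem l 0 hi] at this
            omega
          · have hmono : l.getD j' 0 ≤ l.getD k 0 := getD_mono l hs h hk2
            rw [List.getD_eq_getElem l 0 hk2] at hmono
            rw [List.getD_eq_getElem l 0 hi] at hgt
            omega
        rw [if_neg hmem]
        apply ih (i + 1) j' (by omega) w2
        intro k hk1 hk2
        have h1 := Hc k (by omega) hk2
        have h2 : l.getD i 0 ≤ l.getD (i + 1) 0 := getD_mono l hs (by omega) (by omega)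
        omega

lemma loop_eq_ghost (l : List Int) (hs : l.Pairwise (· ≤ ·)) (t : Int) :
    ∀ i j, j ≤ l.length → (∀ k, i < k → k < j → l.getD k 0 < l.getD i 0 + t) →
      twoSum7Loop l t i j = twoSum7Ghost (l.drop i) t :=
  fun i j hj H => loop_eq_ghost_aux l hs t (l.length - i) i j rfl hj H

lemma dupScan_eq_ghost (l : List Int) (hs : l.Pairwise (· ≤ ·)) :
    twoSum7DupScan l = twoSum7Ghost l 0 := by
  induction l with
  | nil => rfl
  | cons a r ih =>
    cases r with
    | nil => simp [twoSum7DupScan, twoSum7Ghost]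
    | cons b r' =>
      rw [twoSum7DupScan, twoSum7Ghost]
      have hab : a ≤ b := (List.pairwise_cons.mp hs).1 b (List.mem_cons_self)
      by_cases he : a = b
      · rw [if_pos he]
        have : a + 0 ∈ b :: r' := by simp [he]
        rw [if_pos this, add_zero]
      · rw [if_neg he]
        have halt : a < b := lt_of_le_of_ne hab he
        have hpair := (List.pairwise_cons.mp hs).2
        have hbr : ∀ y ∈ r', b ≤ y := (List.pairwise_cons.mp hpair).1
        have hmem : a + 0 ∉ b :: r' := by
          rw [add_zero]
          intro hmem
          rcases List.mem_cons.mp hmem with h | h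
          · exact he h
          · have := hbr a h
            omega
        rw [if_neg hmem]
        exact ih hpair

lemma setScan_eq_ghost (l : List Int) (hs : l.Pairwise (· ≤ ·)) (t : Int) (ht : 0 < t) :
    ∀ s pre, l = pre ++ s → twoSum7SetScan s t (PySem.Set.ofList l) = twoSum7Ghost s t := by
  intro s
  induction s with
  | nil => intro pre _; rfl
  | cons x rest ih =>
    intro pre hpre
    rw [twoSum7SetScan, twoSum7Ghost]
    have hsplit : ∀ p ∈ pre, ∀ q ∈ x :: rest, p ≤ q := by
      have := List.pairwise_append.mp (hpre ▸ hs)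
      exact this.2.2
    have hiff : (x + t ∈ PySem.Set.ofList l) ↔ (x + t ∈ rest) := by
      rw [PySem.Set.mem_ofList, hpre]
      constructor
      · intro h
        rcases List.mem_append.mp h with h | h
        · have := hsplit _ h x List.mem_cons_self
          omega
        · rcases List.mem_cons.mp h with h | h
          · omega
          · exact h
      · intro h
        exact List.mem_append.mpr (Or.inr (List.mem_cons.mpr (Or.inr h)))
    by_cases hmem : x + t ∈ rest
    · rw [if_pos (hiff.mpr hmem), if_pos hmem]
    · rw [if_neg (fun h => hmem (hiff.mp h)), if_neg hmem]
      exact ih (pre ++ [x]) (by simp [hpre])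

-- ===== VERDICT (by name: the statement is the Claim_ definition above) =====
theorem twoSum7_spec : Claim_equal_twoSum7 := by
  intro nums target _
  unfold Spec_twoSum7 twoSum7 twoSum7_alt
  by_cases hnil : nums = []
  · simp [hnil]
  · simp only [hnil, if_false]
    set l := PySem.List.sorted nums (fun x => x) with hl
    have hs : l.Pairwise (· ≤ ·) := PySem.List.sorted_pairwise nums (fun x => x)
    have hlen : 1 ≤ l.length := by
      have : l ≠ [] := by
        intro h; exact hnil ((PySem.List.sorted_eq_nil_iff nums (fun x => x) false).mp h)
      have := List.length_pos_of_ne_nil this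
      omega
    have ht : (0 : Int) ≤ |target| := abs_nonneg target
    have hA : twoSum7Loop l |target| 0 1 = twoSum7Ghost l |target| := by
      have := loop_eq_ghost l hs |target| 0 1 hlen (by omega)
      simpa using this
    rw [hA]
    by_cases ht0 : |target| = 0
    · simp only [ht0, if_true]
      rw [dupScan_eq_ghost l hs]
    · simp only [ht0, if_false]
      rw [setScan_eq_ghost l hs |target| (lt_of_le_of_ne ht (Ne.symm ht0)) l [] (by simp)]
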